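-- pv_equiv track=rewrite | github.com/nnhoangtrieu/transformer-smiles2coor | utils.py | get_dic
-- ===== SOURCE A (Python) =====
-- def get_dic(smi_list) :
--     smi_dic = {'<P>': 0, '<E>' : 1}
--     i = 2
--     for smi in smi_list :
--         for char in smi :
--             if char not in smi_dic :
--                 smi_dic[char] = i
--                 i += 1
--     return smi_dic
-- ===== SOURCE B (Python) =====
-- def get_dic(smi_list):
--     # Sort-based alternative: order the distinct characters by their first index
--     # in the joined string, then build the dict from that sorted order.
--     s = ''.join(smi_list)
--     order = sorted(set(s), key=s.index)
--     return {'<P>': 0, '<E>': 1, **{c: i for i, c in enumerate(order, 2)}}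
-- ===== Notes on version B (the rewrite author's own statement) =====
-- stated objective: alternative
-- what changed: A's single scan with a membership guard and a manually maintained counter is replaced by a sort-based construction: join the strings, take the distinct characters, sort them by their first index via sorted(set(s), key=s.index), and build the dict from that order.
import Mathlib
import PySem

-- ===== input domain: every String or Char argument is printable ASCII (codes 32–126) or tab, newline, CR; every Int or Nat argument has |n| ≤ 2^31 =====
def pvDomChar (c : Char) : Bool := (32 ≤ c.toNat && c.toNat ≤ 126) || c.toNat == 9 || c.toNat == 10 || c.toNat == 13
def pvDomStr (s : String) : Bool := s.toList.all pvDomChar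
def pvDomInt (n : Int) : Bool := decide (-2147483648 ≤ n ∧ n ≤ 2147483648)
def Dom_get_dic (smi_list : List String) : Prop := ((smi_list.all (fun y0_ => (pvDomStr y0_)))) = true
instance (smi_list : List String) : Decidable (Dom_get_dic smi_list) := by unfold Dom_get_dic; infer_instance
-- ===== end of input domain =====

-- B replaces A's scan-with-membership-guard-and-counter by a sort-based construction:
-- sort the distinct characters of the joined string by their first index (objective: alternative).

-- Python's iteration over a string yields 1-character strings (the dict's keys).
def pvKey (c : Char) : String := String.ofList [c]

-- ===== PORT A =====
def get_dic (smi_list : List String) : List (String × Int) :=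
  let init : PySem.Dict String Int × Int :=
    (((PySem.Dict.empty).insert "<P>" 0).insert "<E>" 1, 2)
  let res := smi_list.foldl (fun st smi =>
      smi.toList.foldl (fun st c =>
        if st.1.contains (pvKey c) then st
        else (st.1.insert (pvKey c) st.2, st.2 + 1)) st) init
  res.1.items

-- ===== PORT B =====
-- s.index(c) is ported as s.idxOf c (exact: every sorted element occurs in s, so no ValueError)
def get_dic_alt (smi_list : List String) : List (String × Int) :=
  let s : List Char := smi_list.flatMap (fun smi => smi.toList)   -- ''.join(smi_list)
  let order := PySem.List.sorted (PySem.Set.ofList s) (fun c => s.idxOf c)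
  let seed : PySem.Dict String Int := ((PySem.Dict.empty).insert "<P>" 0).insert "<E>" 1
  ((PySem.List.enumerate order 2).foldl (fun d p => d.insert (pvKey p.2) p.1) seed).items

-- ===== PRECONDITION & SPEC =====
def Spec_get_dic (smi_list : List String) (out : List (String × Int)) : Prop := out = get_dic_alt smi_list
instance (smi_list : List String) (out : List (String × Int)) : Decidable (Spec_get_dic smi_list out) := by unfold Spec_get_dic; infer_instance

-- ===== CLAIM (what is proved, stated in full; the proofs are below) =====
def Claim_equal_get_dic : Prop := ∀ (smi_list : List String), Dom_get_dic smi_list → Spec_get_dic smi_list (get_dic smi_list)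

-- ===== LEMMAS AND PROOFS =====

def pvSeed : PySem.Dict String Int := ((PySem.Dict.empty).insert "<P>" 0).insert "<E>" 1

def pvDictOf (u : List Char) : PySem.Dict String Int :=
  (PySem.List.enumerate u 2).foldl (fun d p => d.insert (pvKey p.2) p.1) pvSeed

theorem pvKey_inj {c c' : Char} (h : pvKey c = pvKey c') : c = c' := by
  have := congrArg String.toList h
  simpa [pvKey, String.toList_ofList] using this

theorem pvKey_ne_P (c : Char) : pvKey c ≠ "<P>" := by
  intro h
  have h2 : [c] = "<P>".toList := by
    simpa [pvKey, String.toList_ofList] using congrArg String.toList h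
  simp at h2

theorem pvKey_ne_E (c : Char) : pvKey c ≠ "<E>" := by
  intro h
  have h2 : [c] = "<E>".toList := by
    simpa [pvKey, String.toList_ofList] using congrArg String.toList h
  simp at h2

theorem enumerate_append_singleton (u : List Char) (c : Char) (s : Int) :
    PySem.List.enumerate (u ++ [c]) s = PySem.List.enumerate u s ++ [(s + u.length, c)] := by
  induction u generalizing s with
  | nil => simp [PySem.List.enumerate_cons]
  | cons x t ih => simp [PySem.List.enumerate_cons, ih]; ring

theorem pvDictOf_append (u : List Char) (c : Char) :
    pvDictOf (u ++ [c]) = (pvDictOf u).insert (pvKey c) (2 + u.length) := by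
  simp [pvDictOf, enumerate_append_singleton]

theorem keys_pvDictOf (u : List Char) :
    (pvDictOf u).keys = PySem.Set.update ["<P>", "<E>"] (u.map pvKey) := by
  have h := PySem.Dict.keys_foldl_insert_key (ν := Int)
      (PySem.List.enumerate u 2) (fun p => pvKey p.2) (fun _ p => p.1) pvSeed
  have hm : (PySem.List.enumerate u 2).map (fun p => pvKey p.2) = u.map pvKey := by
    have h2 := congrArg (List.map pvKey) (PySem.List.map_snd_enumerate u 2)
    rw [List.map_map] at h2
    exact h2
  have hk : pvSeed.keys = ["<P>", "<E>"] := by decide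
  rw [pvDictOf, h, hm, hk]

theorem mem_update_seed (u : List Char) (c : Char) :
    pvKey c ∈ PySem.Set.update ["<P>", "<E>"] (u.map pvKey) ↔ c ∈ u := by
  induction u using List.reverseRecOn with
  | nil =>
    simp [PySem.Set.update, pvKey_ne_P c, pvKey_ne_E c]
  | append_singleton t x ih =>
    have : PySem.Set.update ["<P>", "<E>"] ((t ++ [x]).map pvKey)
        = PySem.Set.add (PySem.Set.update ["<P>", "<E>"] (t.map pvKey)) (pvKey x) := by
      simp [PySem.Set.update, List.foldl_append]
    rw [this, PySem.Set.mem_add, ih]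
    constructor
    · rintro (h | h)
      · exact List.mem_append_left _ h
      · exact List.mem_append_right _ (by simp [pvKey_inj h])
    · intro h
      rcases List.mem_append.mp h with h | h
      · exact Or.inl h
      · simp at h; subst h; exact Or.inr rfl

theorem contains_pvDictOf (u : List Char) (c : Char) :
    (pvDictOf u).contains (pvKey c) = decide (c ∈ u) := by
  rw [PySem.Dict.contains_eq_decide_mem_keys, keys_pvDictOf]
  exact decide_eq_decide.mpr (mem_update_seed u c)

theorem pv_nested_foldl {σ : Type} (f : σ → Char → σ) (l : List String) (st : σ) :
    l.foldl (fun st smi => smi.toList.foldl f st) st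
      = (l.flatMap (fun smi => smi.toList)).foldl f st := by
  induction l generalizing st with
  | nil => rfl
  | cons s t ih => simp [List.foldl_append, ih]

theorem pv_main (cs : List Char) : ∀ (u : List Char),
    cs.foldl (fun st c =>
        if st.1.contains (pvKey c) then st
        else (st.1.insert (pvKey c) st.2, st.2 + 1))
      (pvDictOf u, 2 + (u.length : Int))
      = (pvDictOf (PySem.Set.update u cs), 2 + ((PySem.Set.update u cs).length : Int)) := by
  induction cs with
  | nil => intro u; rfl
  | cons c cs ih =>
    intro u
    have hupd : PySem.Set.update u (c :: cs) = PySem.Set.update (PySem.Set.add u c) cs := rfl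
    by_cases hc : c ∈ u
    · have hadd : PySem.Set.add u c = u := by
        simp [PySem.Set.add, hc]
      simp only [List.foldl_cons, contains_pvDictOf, hc, decide_true, if_true, hupd, hadd]
      exact ih u
    · have hadd : PySem.Set.add u c = u ++ [c] := by
        simp [PySem.Set.add, hc]
      simp only [List.foldl_cons, contains_pvDictOf, hc, decide_false]
      rw [hupd, hadd]
      have := ih (u ++ [c])
      rw [pvDictOf_append] at this
      simpa [add_assoc] using this

-- the distinct characters in first-occurrence order are pairwise strictly increasing in first index
theorem ofList_pairwise_idxOf (cs : List Char) :
    (PySem.Set.ofList cs).Pairwise (fun a b => cs.idxOf a < cs.idxOf b) := by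
  induction cs using List.reverseRecOn with
  | nil => simp [PySem.Set.ofList]
  | append_singleton t x ih =>
    have hof : PySem.Set.ofList (t ++ [x]) = PySem.Set.add (PySem.Set.ofList t) x := by
      simp [PySem.Set.ofList, List.foldl_append]
    rw [hof]
    have hidx : ∀ a ∈ PySem.Set.ofList t, (t ++ [x]).idxOf a = t.idxOf a := by
      intro a ha
      exact List.idxOf_append_of_mem ((PySem.Set.mem_ofList t a).mp ha)
    by_cases hx : x ∈ PySem.Set.ofList t
    · rw [show PySem.Set.add (PySem.Set.ofList t) x = PySem.Set.ofList t by
        simp [PySem.Set.add, hx]]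
      exact List.Pairwise.imp_of_mem (fun ha hb h => by rw [hidx _ ha, hidx _ hb]; exact h) ih
    · rw [show PySem.Set.add (PySem.Set.ofList t) x = PySem.Set.ofList t ++ [x] by
        simp [PySem.Set.add, hx]]
      have hxt : x ∉ t := fun h => hx ((PySem.Set.mem_ofList t x).mpr h)
      apply List.pairwise_append.mpr
      refine ⟨List.Pairwise.imp_of_mem (fun ha hb h => by rw [hidx _ ha, hidx _ hb]; exact h) ih,
             List.pairwise_singleton _ _, ?_⟩
      intro a ha b hb
      have hb' : b = x := by simpa using hb
      rw [hb']
      have hat : a ∈ t := (PySem.Set.mem_ofList t a).mp ha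
      rw [hidx _ ha]
      have h1 : t.idxOf a < t.length := List.idxOf_lt_length_of_mem hat
      have h2 : (t ++ [x]).idxOf x = t.length := by
        simp [List.idxOf_append, hxt]
      omega

-- sorting the distinct characters by first index yields exactly first-occurrence order
theorem sorted_ofList_idxOf (cs : List Char) :
    PySem.List.sorted (PySem.Set.ofList cs) (fun c => cs.idxOf c) = PySem.Set.ofList cs :=
  PySem.List.sorted_eq_of_perm_of_pairwise_lt _ _ (fun c => cs.idxOf c) (List.Perm.refl _) (ofList_pairwise_idxOf cs)

-- ===== VERDICT (by name: the statement is the Claim_ definition above) =====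
theorem get_dic_spec : Claim_equal_get_dic := by
  intro smi_list _
  unfold Spec_get_dic
  simp only [get_dic, get_dic_alt]
  rw [pv_nested_foldl, sorted_ofList_idxOf]
  have h0 : (((PySem.Dict.empty).insert "<P>" 0).insert "<E>" (1:Int), (2:Int))
      = (pvDictOf [], 2 + (([] : List Char).length : Int)) := rfl
  rw [h0, pv_main (smi_list.flatMap (fun smi => smi.toList)) []]
  simp [pvDictOf, PySem.Set.ofList, PySem.Set.update, pvSeed]
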